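-- pv_equiv track=rewrite | github.com/adamkikha/Connect-4 | agent.py | eval_seq
-- ===== SOURCE A (Python) =====
-- def eval_seq(state : str,seq : list,player : str):
--     score = 0
--     i = 0
--     c = 0
--     while i < len(seq):
--         c = 0
--         while i < len(seq) and state[seq[i]] != player:
--             i += 1
--         while i < len(seq) and state[seq[i]] == player:
--             c += 1
--             i += 1
--         if c > 3:
--             score = c - 3
--             break
--
--     if player == "2":
--         score *= -1
--     return score
-- ===== SOURCE B (Python) =====
-- def eval_seq(state: str, seq: list, player: str):
--     t = "".join(state[p] for p in seq)
--     score = 0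
--     idx = t.find(player * 4)
--     if idx != -1:
--         end = idx
--         while end < len(t) and t[end] == player:
--             end += 1
--         if end - idx > 3:
--             score = end - idx - 3
--     if player == "2":
--         score = -score
--     return score
-- ===== Notes on version B (the rewrite author's own statement) =====
-- stated objective: alternative
-- what changed: Instead of A's index-driven skip/count while-loops, B joins the looked-up characters into one string, locates the first qualifying run with substring search t.find(player*4), measures that run by extending from the found index, and negates for player "2".
-- outside the precondition, e.g. on eval_seq('1111.', [0, 1, 2, 3, 4, 99], '1'): A returns 1, B raises IndexError
import Mathlib
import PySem

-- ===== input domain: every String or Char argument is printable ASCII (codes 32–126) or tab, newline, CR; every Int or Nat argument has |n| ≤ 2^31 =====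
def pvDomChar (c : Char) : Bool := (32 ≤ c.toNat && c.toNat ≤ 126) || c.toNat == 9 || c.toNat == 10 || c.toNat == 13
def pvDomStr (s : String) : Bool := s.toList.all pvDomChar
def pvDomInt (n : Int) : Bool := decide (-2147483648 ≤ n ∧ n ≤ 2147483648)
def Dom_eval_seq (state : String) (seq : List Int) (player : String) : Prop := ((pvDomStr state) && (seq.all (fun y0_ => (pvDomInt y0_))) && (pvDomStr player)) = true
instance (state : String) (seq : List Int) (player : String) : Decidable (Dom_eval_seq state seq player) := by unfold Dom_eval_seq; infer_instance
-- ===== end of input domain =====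

-- B replaces A's index-driven skip/count while-loops by building the looked-up string once and
-- locating the first qualifying run with substring search for player*4 (alternative algorithm; same cost).

-- state[q] as a 1-character Python string; "" for an out-of-range index (excluded by Pre_eval_seq).
def pvLook (state : String) (q : Int) : String :=
  match PySem.Str.pyGet? state q with
  | some ch => String.ofList [ch]
  | none => ""

-- ===== PORT A =====
-- while i < len(seq) and state[seq[i]] != player: i += 1   (remaining suffix of seq carried instead of i)
def skipGo (state player : String) : List Int → List Int
  | [] => []
  | q :: rest => if pvLook state q != player then skipGo state player rest else q :: rest

-- while i < len(seq) and state[seq[i]] == player: c += 1; i += 1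
def countGo (state player : String) : List Int → Nat × List Int
  | [] => (0, [])
  | q :: rest =>
    if pvLook state q == player then
      let z := countGo state player rest
      (z.1 + 1, z.2)
    else (0, q :: rest)

theorem skipGo_length_le (state player : String) (l : List Int) :
    (skipGo state player l).length ≤ l.length := by
  induction l with
  | nil => simp [skipGo]
  | cons q rest ih => simp only [skipGo]; split <;> simp <;> omega

theorem countGo_snd_length_le (state player : String) (l : List Int) :
    (countGo state player l).2.length ≤ l.length := by
  induction l with
  | nil => simp [countGo]
  | cons q rest ih => simp only [countGo]; split <;> simp <;> omega

theorem skipGo_cons_eq (state player : String) :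
    ∀ (l : List Int) (q' : Int) (r : List Int), skipGo state player l = q' :: r →
      (pvLook state q' == player) = true := by
  intro l
  induction l with
  | nil => intro q' r h; simp [skipGo] at h
  | cons a t ih =>
    intro q' r h
    simp only [skipGo] at h
    split at h
    · exact ih q' r h
    · next hc =>
      cases h
      simpa using hc

theorem outer_dec (state player : String) (q : Int) (rest : List Int) :
    (countGo state player (skipGo state player (q :: rest))).2.length < (q :: rest).length := by
  rcases h : skipGo state player (q :: rest) with _ | ⟨q', r⟩
  · simp [countGo]
  · have hq' : (pvLook state q' == player) = true := skipGo_cons_eq state player _ q' r h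
    have hlen : r.length + 1 ≤ rest.length + 1 := by
      have := skipGo_length_le state player (q :: rest)
      rw [h] at this; simpa using this
    have := countGo_snd_length_le state player r
    simp only [countGo, hq', if_pos]
    simp only [List.length_cons]
    omega

-- the outer while loop of A
def outerGo (state player : String) (rem : List Int) : Int :=
  match rem with
  | [] => 0
  | q :: rest =>
    let rem1 := skipGo state player (q :: rest)
    let z := countGo state player rem1
    if (z.1 : Int) > 3 then (z.1 : Int) - 3 else outerGo state player z.2
termination_by rem.length
decreasing_by exact outer_dec state player q rest

def eval_seq (state : String) (seq : List Int) (player : String) : Int :=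
  let score := outerGo state player seq
  if player == "2" then score * -1 else score

-- ===== PORT B =====
-- while end < len(t) and t[end] == player: end += 1
def pvExtend (t : List Char) (player : String) (e : Nat) : Nat :=
  if h : e < t.length then
    if String.ofList [t[e]] == player then pvExtend t player (e + 1) else e
  else e
termination_by t.length - e

-- player * 4
def pvPat (player : String) : List Char :=
  player.toList ++ player.toList ++ player.toList ++ player.toList

-- idx = t.find(player * 4); if idx != -1: extend the run, score it
def pvCore (player : String) (t : List Char) : Int :=
  if PySem.Chars.find t (pvPat player) = -1 then 0
  else
    if ((pvExtend t player (PySem.Chars.find t (pvPat player)).toNat : Int)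
        - PySem.Chars.find t (pvPat player)) > 3 then
      ((pvExtend t player (PySem.Chars.find t (pvPat player)).toNat : Int)
        - PySem.Chars.find t (pvPat player)) - 3
    else 0

def eval_seq_alt (state : String) (seq : List Int) (player : String) : Int :=
  let t := seq.flatMap (fun q => (pvLook state q).toList)   -- "".join(state[p] for p in seq)
  let score := pvCore player t
  if player == "2" then -score else score

-- ===== PRECONDITION & SPEC =====
-- Pre_ excludes inputs with an out-of-range index in seq, on which Python A raises IndexError.
-- This is slightly narrower than A's true domain: A returns without reaching a later invalid
-- index when the first >3 player-run ends strictly before it (B's eager join raises there).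
def Pre_eval_seq (state : String) (seq : List Int) (player : String) : Prop :=
  ∀ q ∈ seq, PySem.Raise.InRange state.toList.length q
instance (state : String) (seq : List Int) (player : String) : Decidable (Pre_eval_seq state seq player) := by unfold Pre_eval_seq; infer_instance

def pvWitness_eval_seq : String × List Int × String := ("1122", [0, 1, -1], "1")

def Spec_eval_seq (state : String) (seq : List Int) (player : String) (out : Int) : Prop := out = eval_seq_alt state seq player
instance (state : String) (seq : List Int) (player : String) (out : Int) : Decidable (Spec_eval_seq state seq player out) := by unfold Spec_eval_seq; infer_instance

-- ===== CLAIM (what is proved, stated in full; the proofs are below) =====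
def Claim_equal_eval_seq : Prop := ∀ (state : String) (seq : List Int) (player : String), Dom_eval_seq state seq player → Pre_eval_seq state seq player → Spec_eval_seq state seq player (eval_seq state seq player)

-- ===== LEMMAS AND PROOFS =====

-- first run of p of length > 3 scores length - 3; a common reference shape for both ports
def firstRun (p : Char) : List Char → Int
  | [] => 0
  | a :: l =>
    if a = p then
      let n := (l.takeWhile (· = p)).length + 1
      if (n : Int) > 3 then (n : Int) - 3 else firstRun p (l.dropWhile (· = p))
    else firstRun p l
termination_by l => l.length
decreasing_by
  · exact Nat.lt_succ_of_le (List.length_dropWhile_le _ _)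
  · exact Nat.lt_succ_self _

theorem ofList_beq_iff (l : List Char) (s : String) :
    (String.ofList l == s) = true ↔ s.toList = l := by
  rw [beq_iff_eq]
  constructor
  · intro h; rw [← h, String.toList_ofList]
  · intro h
    have := congrArg String.ofList h
    rw [String.ofList_toList] at this
    exact this.symm

theorem pvLook_some (state : String) (q : Int)
    (h : PySem.Raise.InRange state.toList.length q) :
    ∃ c, PySem.Str.pyGet? state q = some c := by
  rcases hg : PySem.Str.pyGet? state q with _ | c
  · rw [PySem.Str.pyGet?_eq, PySem.Chars.pyGet?_eq_listPyGet?,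
      PySem.List.pyGet?_eq_none_iff] at hg
    exact absurd h hg
  · exact ⟨c, rfl⟩

theorem prefix_drop_infix (pat s : List Char) (j : Nat) (h : pat <+: s.drop j) :
    pat <:+: s :=
  h.isInfix.trans (s.drop_suffix j).isInfix

-- find is characterized by "prefix here, nowhere earlier"
theorem find_eq_of (s pat : List Char) (k : Nat)
    (h1 : pat <+: s.drop k) (h2 : ∀ i < k, ¬ pat <+: s.drop i) :
    PySem.Chars.find s pat = (k : Int) := by
  have hin : pat <:+: s := prefix_drop_infix pat s k h1
  have hnn : 0 ≤ PySem.Chars.find s pat := (PySem.Chars.find_nonneg_iff s pat).mpr hin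
  obtain ⟨hpre, hmin⟩ := PySem.Chars.find_spec hnn
  set f := (PySem.Chars.find s pat).toNat with hf
  have hfk : f = k := by
    rcases Nat.lt_trichotomy f k with h | h | h
    · exact absurd hpre (h2 f h)
    · exact h
    · exact absurd h1 (hmin k h)
  omega

-- shifting find past a match-free zone
theorem find_shift (s pat : List Char) (k : Nat)
    (hno : ∀ i < k, ¬ pat <+: s.drop i) :
    PySem.Chars.find s pat =
      if PySem.Chars.find (s.drop k) pat = -1 then -1
      else (k : Int) + PySem.Chars.find (s.drop k) pat := by
  by_cases h : PySem.Chars.find (s.drop k) pat = -1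
  · rw [if_pos h]
    rw [PySem.Chars.find_eq_neg_one_iff] at h ⊢
    intro hin
    obtain ⟨j, hj⟩ := by
      have := (PySem.Chars.exists_prefix_drop_iff_isIn pat s).symm.mp
        ((PySem.Chars.isIn_iff_infix pat s).mpr hin)
      exact this
    by_cases hjk : j < k
    · exact hno j hjk hj
    · apply h
      apply prefix_drop_infix pat (s.drop k) (j - k)
      rw [List.drop_drop]
      have hjd : k + (j - k) = j := by omega
      rwa [hjd]
  · rw [if_neg h]
    have hnn : 0 ≤ PySem.Chars.find (s.drop k) pat := by
      have := PySem.Chars.neg_one_le_find (s.drop k) pat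
      omega
    obtain ⟨hpre, hmin⟩ := PySem.Chars.find_spec hnn
    set j := (PySem.Chars.find (s.drop k) pat).toNat with hj
    rw [List.drop_drop] at hpre
    have : PySem.Chars.find s pat = ((k + j : Nat) : Int) := by
      apply find_eq_of s pat (k + j)
      · exact hpre
      · intro i hi
        by_cases hik : i < k
        · exact hno i hik
        · intro hp
          apply hmin (i - k) (by omega)
          rw [List.drop_drop]
          have hid : k + (i - k) = i := by omega
          rwa [hid]
    rw [this, ← Int.toNat_of_nonneg hnn, ← hj]
    push_cast
    ring

-- the while loop measures the run of player-cells starting at e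
theorem pvExtend_eq (t : List Char) (player : String) (e : Nat) :
    pvExtend t player e =
      e + ((t.drop e).takeWhile (fun ch => String.ofList [ch] == player)).length := by
  by_cases h : e < t.length
  · rw [List.drop_eq_getElem_cons h, List.takeWhile_cons]
    by_cases hc : (String.ofList [t[e]] == player) = true
    · rw [pvExtend, dif_pos h, if_pos hc, hc, if_pos rfl]
      rw [pvExtend_eq t player (e + 1)]
      simp
      omega
    · rw [pvExtend, dif_pos h, if_neg hc]
      simp [hc]
  · rw [pvExtend, dif_neg h, List.drop_eq_nil_of_le (Nat.le_of_not_lt h)]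
    simp
termination_by t.length - e

-- pvCore ignores a prefix free of pattern matches
theorem pvCore_drop (player : String) (t : List Char) (k : Nat)
    (hno : ∀ i < k, ¬ pvPat player <+: t.drop i) :
    pvCore player t = pvCore player (t.drop k) := by
  unfold pvCore
  rw [find_shift t (pvPat player) k hno]
  by_cases h : PySem.Chars.find (t.drop k) (pvPat player) = -1
  · simp [h]
  · rw [if_neg h]
    have hnn : 0 ≤ PySem.Chars.find (t.drop k) (pvPat player) := by
      have := PySem.Chars.neg_one_le_find (t.drop k) (pvPat player)
      omega
    set j := PySem.Chars.find (t.drop k) (pvPat player) with hj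
    have hne : ¬ ((k : Int) + j = -1) := by omega
    rw [if_neg hne, if_neg h]
    have htn : ((k : Int) + j).toNat = k + j.toNat := by omega
    rw [htn, pvExtend_eq, pvExtend_eq, ← List.drop_drop]
    have hval : ((k + j.toNat + (((t.drop k).drop j.toNat).takeWhile
        (fun ch => String.ofList [ch] == player)).length : Nat) : Int) - ((k : Int) + j)
        = ((j.toNat + (((t.drop k).drop j.toNat).takeWhile
        (fun ch => String.ofList [ch] == player)).length : Nat) : Int) - j := by
      omega
    rw [hval]

-- a player that is not one character never matches a cell: score 0
theorem pvCore_not_single (player : String) (hp : player.toList.length ≠ 1)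
    (t : List Char) : pvCore player t = 0 := by
  unfold pvCore
  by_cases h : PySem.Chars.find t (pvPat player) = -1
  · simp [h]
  · rw [if_neg h]
    have hnn : 0 ≤ PySem.Chars.find t (pvPat player) := by
      have := PySem.Chars.neg_one_le_find t (pvPat player)
      omega
    rw [pvExtend_eq]
    have hnil : (t.drop (PySem.Chars.find t (pvPat player)).toNat).takeWhile
        (fun ch => String.ofList [ch] == player) = [] := by
      rw [List.takeWhile_eq_nil_iff]
      intro hne hch
      rw [ofList_beq_iff] at hch
      exact hp (by rw [hch]; rfl)
    rw [hnil]
    have hval : (((PySem.Chars.find t (pvPat player)).toNat + ([] : List Char).length : Nat) : Int)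
        - PySem.Chars.find t (pvPat player) = 0 := by
      simp; omega
    rw [hval]
    norm_num

-- with a single-character player, pvCore computes firstRun
theorem pvCore_eq_firstRun (p : Char) (player : String) (hp : player.toList = [p]) :
    ∀ t : List Char, pvCore player t = firstRun p t := by
  have hpat : pvPat player = [p, p, p, p] := by rw [pvPat, hp]; rfl
  have hcell : ∀ ch : Char, (String.ofList [ch] == player) = true ↔ ch = p := by
    intro ch
    rw [ofList_beq_iff, hp]
    constructor
    · intro h; injection h with h1; exact h1.symm
    · intro h; rw [h]
  suffices hsuf : ∀ (n : Nat) (t : List Char), t.length ≤ n → pvCore player t = firstRun p t by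
    exact fun t => hsuf t.length t le_rfl
  intro n
  induction n with
  | zero =>
    intro t ht
    have : t = [] := List.length_eq_zero_iff.mp (Nat.le_zero.mp ht)
    subst this
    unfold pvCore
    rw [hpat]
    have hfe : PySem.Chars.find ([] : List Char) [p, p, p, p] = -1 := by
      rw [PySem.Chars.find_eq_neg_one_iff]
      intro h
      simp [List.infix_nil] at h
    simp [hfe, firstRun]
  | succ n ih =>
  intro t htn
  match t with
  | [] =>
    unfold pvCore
    rw [hpat]
    have hfe : PySem.Chars.find ([] : List Char) [p, p, p, p] = -1 := by
      rw [PySem.Chars.find_eq_neg_one_iff]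
      intro h
      simp [List.infix_nil] at h
    simp [hfe, firstRun]
  | a :: t' =>
    by_cases hap : a = p
    · subst hap
      set m := (t'.takeWhile (· = a)).length with hm
      set t'' := t'.dropWhile (· = a) with ht''
      have hrep : t'.takeWhile (· = a) = List.replicate m a := by
        apply List.eq_replicate_of_mem
        intro b hb
        have := List.mem_takeWhile_imp hb
        simpa using this
      have hsplit : a :: t' = List.replicate (m + 1) a ++ t'' := by
        conv_lhs => rw [← List.takeWhile_append_dropWhile (p := (· = a)) (l := t')]
        rw [hrep, ← ht'']
        rfl
      have hdropm : (a :: t').drop (m + 1) = t'' := by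
        rw [hsplit]
        have hdl := List.drop_left (l₁ := List.replicate (m + 1) a) (l₂ := t'')
        simpa using hdl
      have ht''head : ∀ (hb : 0 < t''.length), t''[0]'hb ≠ a := by
        intro hb
        have hdz := List.dropWhile_get_zero_not (fun x => decide (x = a)) t'
          (by rw [← ht'']; exact hb)
        simp only [List.get_eq_getElem, ← ht''] at hdz
        simpa using hdz
      by_cases hbig : 3 < (m : Int) + 1
      · -- run of length m+1 ≥ 4: pattern matches at 0
        have hfind : PySem.Chars.find (a :: t') [a, a, a, a] = 0 := by
          have h1 : [a, a, a, a] <+: (a :: t').drop 0 := by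
            rw [List.drop_zero, hsplit]
            have h4 : (4 : Nat) ≤ m + 1 := by omega
            have : List.replicate (m + 1) a
                = List.replicate 4 a ++ List.replicate (m + 1 - 4) a := by
              rw [← List.replicate_add]
              congr 1
              omega
            rw [this, List.append_assoc]
            exact ⟨List.replicate (m + 1 - 4) a ++ t'', rfl⟩
          have := find_eq_of (a :: t') [a, a, a, a] 0 h1 (by omega)
          simpa using this
        have hfun : (fun ch => String.ofList [ch] == player) = (fun x => decide (x = a)) := by
          funext x
          by_cases hx : x = a
          · simp [hx, (hcell a).mpr rfl]
          · have hf : (String.ofList [x] == player) = false := by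
              rw [Bool.eq_false_iff]
              intro hc
              exact hx ((hcell x).mp hc)
            simp [hf, hx]
        unfold pvCore
        rw [hpat, hfind]
        norm_num
        rw [pvExtend_eq, hfun]
        simp only [List.drop_zero, List.takeWhile_cons, decide_true, if_true,
          List.length_cons, Nat.zero_add]
        rw [← hm, firstRun, if_pos rfl, ← hm]
        rw [if_pos (by omega)]
        push_cast
        simp only [gt_iff_lt]
        rw [if_pos hbig]
      · -- short run: skip it, no match can start inside it
        have hno : ∀ i < m + 1, ¬ [a, a, a, a] <+: (a :: t').drop i := by
          intro i hi hpre
          have hlen := hpre.length_le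
          rw [hsplit] at hpre
          have hdrop : (List.replicate (m + 1) a ++ t'').drop i
              = List.replicate (m + 1 - i) a ++ t'' := by
            rw [List.drop_append_of_le_length (by simp; omega)]
            congr 1
            simp [List.drop_replicate]
          rw [hdrop] at hpre
          set r := m + 1 - i with hr
          have hr4 : r < 4 := by omega
          have hlen2 : 4 ≤ r + t''.length := by
            have := hpre.length_le
            simpa using this
          have ht''ne : t'' ≠ [] := by
            intro hnil
            rw [hnil] at hlen2
            simp at hlen2
            omega
          have hidx : (List.replicate r a ++ t'')[r]'(by simp; have := List.length_pos_of_ne_nil ht''ne; omega) = a := by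
            have hg := List.IsPrefix.getElem hpre (i := r) (by simp; omega)
            have hlit : [a, a, a, a][r]'hr4 = a := by interval_cases r <;> rfl
            exact hg.symm.trans hlit
          rw [List.getElem_append_right (by simp)] at hidx
          simp at hidx
          exact ht''head (List.length_pos_of_ne_nil ht''ne) hidx
        have hstep : pvCore player (a :: t') = pvCore player t'' := by
          have := pvCore_drop player (a :: t') (m + 1) (by rw [hpat]; exact hno)
          rwa [hdropm] at this
        rw [hstep, firstRun, if_pos rfl, ← hm, if_neg (by push_cast at hbig ⊢; omega), ← ht'']
        exact ih t'' (by
          have h1 : t''.length ≤ t'.length := by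
            rw [ht'']
            exact List.length_dropWhile_le _ _
          simp at htn
          omega)
    · -- a ≠ p: no match starts at 0
      have hno : ∀ i < 1, ¬ [p, p, p, p] <+: (a :: t').drop i := by
        intro i hi hpre
        interval_cases i
        rw [List.drop_zero] at hpre
        rcases hpre with ⟨r, hr⟩
        have : p = a := by
          have := congrArg (fun l => l.head?) hr
          simpa using this
        exact hap this.symm
      have hstep : pvCore player (a :: t') = pvCore player t' := by
        have := pvCore_drop player (a :: t') 1 (by rw [hpat]; exact hno)
        simpa using this
      rw [hstep, firstRun, if_neg hap]
      exact ih t' (by simp at htn; omega)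

-- under Pre, each cell is one character
theorem flatMap_cells (state : String) :
    ∀ seq : List Int, (∀ q ∈ seq, PySem.Raise.InRange state.toList.length q) →
      ∀ q ∈ seq, ∃ c, pvLook state q = String.ofList [c] := by
  intro seq hpre q hq
  obtain ⟨c, hc⟩ := pvLook_some state q (hpre q hq)
  exact ⟨c, by rw [pvLook, hc]⟩

-- A's outer loop ignores a leading non-player element
theorem outerGo_skip (state player : String) (q : Int) (rest : List Int)
    (h : (pvLook state q == player) = false) :
    outerGo state player (q :: rest) = outerGo state player rest := by
  have h' : pvLook state q ≠ player := by
    intro he; rw [he] at h; simp at h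
  cases rest with
  | nil => simp [outerGo, skipGo, countGo, h']
  | cons r rs =>
    rw [outerGo, outerGo]
    simp [skipGo, h']

theorem countGo_eq (state player : String) (l : List Int) :
    countGo state player l =
      ((l.takeWhile (fun x => pvLook state x == player)).length,
       l.dropWhile (fun x => pvLook state x == player)) := by
  induction l with
  | nil => simp [countGo]
  | cons q rest ih =>
    simp only [countGo, List.takeWhile_cons, List.dropWhile_cons]
    by_cases h : (pvLook state q == player) = true <;> simp [h, ih]

-- if no cell ever equals player, A scores 0
theorem outerGo_zero (state player : String) :
    ∀ seq : List Int, (∀ q ∈ seq, (pvLook state q == player) = false) →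
      outerGo state player seq = 0 := by
  intro seq
  induction seq with
  | nil => intro _; rw [outerGo]
  | cons q rest ih =>
    intro h
    rw [outerGo_skip state player q rest (h q (by simp))]
    exact ih (fun q' hq' => h q' (by simp [hq']))

-- with a one-character player and all indices in range, A computes firstRun of the joined chars
theorem outerGo_eq_firstRun (state player : String) (p : Char) (hp : player.toList = [p]) :
    ∀ (n : Nat) (seq : List Int), seq.length ≤ n →
      (∀ q ∈ seq, PySem.Raise.InRange state.toList.length q) →
      outerGo state player seq = firstRun p (seq.flatMap (fun q => (pvLook state q).toList)) := by
  have hcell : ∀ ch : Char, (String.ofList [ch] == player) = true ↔ ch = p := by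
    intro ch
    rw [ofList_beq_iff, hp]
    constructor
    · intro h; injection h with h1; exact h1.symm
    · intro h; rw [h]
  intro n
  induction n with
  | zero =>
    intro seq h _
    have : seq = [] := List.length_eq_zero_iff.mp (Nat.le_zero.mp h)
    subst this
    simp [outerGo, firstRun]
  | succ n ih =>
    intro seq hlen hpre
    cases seq with
    | nil => simp [outerGo, firstRun]
    | cons q rest =>
      obtain ⟨c, hc⟩ := flatMap_cells state (q :: rest) hpre q (by simp)
      have hfm : (q :: rest).flatMap (fun x => (pvLook state x).toList)
          = c :: rest.flatMap (fun x => (pvLook state x).toList) := by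
        rw [List.flatMap_cons, hc, String.toList_ofList]
        rfl
      by_cases hcp : c = p
      · rw [hcp] at hc hfm
        have hq : (pvLook state q == player) = true := by
          rw [hc]; exact (hcell p).mpr rfl
        -- takeWhile / dropWhile correspondence between index-cells and chars
        have hcorr : ∀ l : List Int, (∀ x ∈ l, PySem.Raise.InRange state.toList.length x) →
            ((l.flatMap (fun x => (pvLook state x).toList)).takeWhile (· = p)).length
              = (l.takeWhile (fun x => pvLook state x == player)).length ∧
            (l.flatMap (fun x => (pvLook state x).toList)).dropWhile (· = p)
              = (l.dropWhile (fun x => pvLook state x == player)).flatMap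
                  (fun x => (pvLook state x).toList) := by
          intro l
          induction l with
          | nil => intro _; simp
          | cons r rs ihl =>
            intro hl
            obtain ⟨c', hc'⟩ := flatMap_cells state (r :: rs) hl r (by simp)
            have hfm' : (r :: rs).flatMap (fun x => (pvLook state x).toList)
                = c' :: rs.flatMap (fun x => (pvLook state x).toList) := by
              rw [List.flatMap_cons, hc', String.toList_ofList]
              rfl
            have hcc : (pvLook state r == player) = true ↔ c' = p := by
              rw [hc']; exact hcell c'
            obtain ⟨ih1, ih2⟩ := ihl (fun x hx => hl x (by simp [hx]))
            by_cases hcp' : c' = p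
            · have hr : (pvLook state r == player) = true := hcc.mpr hcp'
              constructor
              · rw [hfm', List.takeWhile_cons, List.takeWhile_cons]
                simp only [hr, if_pos, hcp']
                simp [ih1]
              · rw [hfm', List.dropWhile_cons, List.dropWhile_cons]
                simp only [hr, if_pos, hcp']
                simp [ih2]
            · have hr : (pvLook state r == player) = false := by
                rw [Bool.eq_false_iff]
                intro h
                exact hcp' (hcc.mp h)
              constructor
              · rw [hfm', List.takeWhile_cons, List.takeWhile_cons]
                simp [hr, hcp']
              · rw [hfm', List.dropWhile_cons, List.dropWhile_cons]
                simp [hr, hcp', hfm']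
        obtain ⟨hco1, hco2⟩ := hcorr rest (fun x hx => hpre x (by simp [hx]))
        rw [hfm, firstRun, if_pos rfl]
        rw [outerGo]
        have hskip : skipGo state player (q :: rest) = q :: rest := by
          rw [skipGo]
          simp [bne, hq]
        rw [hskip, countGo_eq]
        simp only [List.takeWhile_cons, List.dropWhile_cons, hq, if_pos]
        rw [hco1]
        set m := (rest.takeWhile (fun x => pvLook state x == player)).length with hmdef
        by_cases hbig : ((m + 1 : Nat) : Int) > 3
        · rw [if_pos (by simp only [List.length_cons]; push_cast at hbig ⊢; omega),
            if_pos (by push_cast at hbig ⊢; omega)]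
          simp only [List.length_cons]
          push_cast
          omega
        · rw [if_neg (by simp only [List.length_cons]; push_cast at hbig ⊢; omega),
            if_neg (by push_cast at hbig ⊢; omega)]
          rw [hco2]
          apply ih
          · have h1 := List.length_dropWhile_le (fun x => pvLook state x == player) rest
            simp at hlen
            omega
          · intro x hx
            exact hpre x (by
              have := (List.dropWhile_sublist (l := rest)
                (p := fun x => pvLook state x == player)).mem hx
              simp [this])
      · have hq : (pvLook state q == player) = false := by
          rw [Bool.eq_false_iff]
          intro h
          rw [hc] at h
          exact hcp ((hcell c).mp h)
        rw [outerGo_skip state player q rest hq, hfm, firstRun, if_neg hcp]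
        apply ih
        · simp at hlen; omega
        · intro x hx; exact hpre x (by simp [hx])

-- ===== VERDICT (by name: the statement is the Claim_ definition above) =====
theorem eval_seq_spec : Claim_equal_eval_seq := by
  intro state seq player _ hpre
  unfold Spec_eval_seq eval_seq eval_seq_alt
  have hmain : outerGo state player seq
      = pvCore player (seq.flatMap (fun q => (pvLook state q).toList)) := by
    rcases hp : player.toList with _ | ⟨p, _ | ⟨c2, l2⟩⟩
    · -- player "" : no cell matches, and pvCore's run extension is empty
      rw [pvCore_not_single player (by rw [hp]; simp)]
      apply outerGo_zero
      intro q hq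
      obtain ⟨c, hc⟩ := flatMap_cells state seq hpre q hq
      rw [hc, Bool.eq_false_iff]
      intro h
      rw [ofList_beq_iff, hp] at h
      exact absurd h (by simp)
    · -- single-character player
      rw [pvCore_eq_firstRun p player hp]
      exact outerGo_eq_firstRun state player p hp seq.length seq le_rfl hpre
    · -- player longer than one character: neither side ever matches a one-char cell
      rw [pvCore_not_single player (by rw [hp]; simp)]
      apply outerGo_zero
      intro q hq
      obtain ⟨c, hc⟩ := flatMap_cells state seq hpre q hq
      rw [hc, Bool.eq_false_iff]
      intro h
      rw [ofList_beq_iff, hp] at h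
      simp at h
  rw [hmain]
  by_cases h : (player == "2") = true <;> simp [h, mul_comm]
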